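-- pv_equiv track=rewrite | github.com/yourowndisaster09/aoc2024 | 22/submit.py | part1
-- ===== SOURCE A (Python) =====
-- def part1(data, n):
--     sumNthSecret = 0
--     for secret in data:
--         for i in range(n):
--             result = secret * 64
--             secret = result ^ secret
--             secret = secret % 16777216
--             result = secret // 32
--             secret = result ^ secret
--             secret = secret % 16777216
--             result = secret * 2048
--             secret = result ^ secret
--             secret = secret % 16777216
--         sumNthSecret += secret
--     return sumNthSecret
-- ===== SOURCE B (Python) =====
-- def part1(data, n):
--     # Model one PRNG step as a GF(2)-linear map on the 24-bit state, build its
--     # 24x24 bit-matrix, raise it to the n-th power by squaring, apply to each seed.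
--     if n <= 0:
--         return sum(data)
--     MASK = 16777215
--
--     def step(s):
--         s = (s ^ (s << 6)) & MASK
--         s = (s ^ (s >> 5)) & MASK
--         s = (s ^ (s << 11)) & MASK
--         return s
--
--     def apply(cols, x):
--         r = 0
--         for j in range(24):
--             if (x >> j) & 1 == 1:
--                 r ^= cols[j]
--         return r
--
--     def compose(a, b):
--         return [apply(a, c) for c in b]
--
--     base = [step(1 << j) for j in range(24)]
--     res = [1 << j for j in range(24)]
--     m = n
--     while m > 0:
--         if m % 2 == 1:
--             res = compose(base, res)
--         base = compose(base, base)
--         m //= 2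
--     return sum(apply(res, s % 16777216) for s in data)
-- ===== Notes on version B (the rewrite author's own statement) =====
-- stated objective: faster
-- what changed: B replaces A's per-seed loop of n xor/shift rounds by one 24x24 GF(2) bit-matrix for the round function, raised to the n-th power by repeated squaring and applied once to each seed's 24-bit residue.
import Mathlib
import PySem

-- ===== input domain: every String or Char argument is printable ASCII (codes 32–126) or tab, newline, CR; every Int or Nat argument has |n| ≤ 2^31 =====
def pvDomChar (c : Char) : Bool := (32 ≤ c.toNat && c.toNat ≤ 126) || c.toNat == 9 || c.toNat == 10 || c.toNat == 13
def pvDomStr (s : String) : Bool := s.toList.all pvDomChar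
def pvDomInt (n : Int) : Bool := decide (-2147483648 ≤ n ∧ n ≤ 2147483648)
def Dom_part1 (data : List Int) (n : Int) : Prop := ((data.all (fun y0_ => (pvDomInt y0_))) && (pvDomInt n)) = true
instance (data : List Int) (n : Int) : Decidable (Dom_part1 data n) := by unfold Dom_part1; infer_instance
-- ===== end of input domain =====

-- B replaces the per-seed n-step simulation by one GF(2) 24x24 bit-matrix power (square-and-multiply);
-- equivalence of the return values is proved for all inputs (both programs are total).

-- ===== PORT A =====
-- one pass of A's inner loop body (the three xor/mod rounds), exactly as written
def part1Body (secret : Int) : Int :=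
  let result := secret * 64
  let secret := PySem.Int.bxor result secret
  let secret := PySem.Int.mod secret 16777216
  let result := PySem.Int.floordiv secret 32
  let secret := PySem.Int.bxor result secret
  let secret := PySem.Int.mod secret 16777216
  let result := secret * 2048
  let secret := PySem.Int.bxor result secret
  PySem.Int.mod secret 16777216

def part1 (data : List Int) (n : Int) : Int :=
  data.foldl (fun sumNthSecret secret =>
    sumNthSecret + (PySem.List.pyRange 0 n 1).foldl (fun s _ => part1Body s) secret) 0

-- ===== PORT B =====
def altStep (s : Nat) : Nat :=
  let s := (s ^^^ (s <<< 6)) &&& 16777215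
  let s := (s ^^^ (s >>> 5)) &&& 16777215
  (s ^^^ (s <<< 11)) &&& 16777215

-- Source B's `apply(cols, x)`; cols[j] is always in bounds (cols has 24 entries), rendered totally as getD
def altApply (cols : List Nat) (x : Nat) : Nat :=
  (List.range 24).foldl (fun r j => if (x >>> j) &&& 1 = 1 then r ^^^ cols.getD j 0 else r) 0

def altCompose (a b : List Nat) : List Nat := b.map (fun c => altApply a c)

-- Source B's `while m > 0` square-and-multiply loop
def altPow (base res : List Nat) (m : Nat) : List Nat :=
  if h : m = 0 then res
  else altPow (altCompose base base) (if m % 2 = 1 then altCompose base res else res) (m / 2)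
termination_by m
decreasing_by exact Nat.div_lt_self (Nat.pos_of_ne_zero h) one_lt_two

def part1_alt (data : List Int) (n : Int) : Int :=
  if n ≤ 0 then data.foldl (· + ·) 0
  else
    let base := (List.range 24).map (fun j => altStep (1 <<< j))
    let res := altPow base ((List.range 24).map (fun j => 1 <<< j)) n.toNat
    data.foldl (fun acc s => acc + (altApply res (PySem.Int.mod s 16777216).toNat : Int)) 0

-- ===== PRECONDITION & SPEC =====
def Spec_part1 (data : List Int) (n : Int) (out : Int) : Prop := out = part1_alt data n
instance (data : List Int) (n : Int) (out : Int) : Decidable (Spec_part1 data n out) := by unfold Spec_part1; infer_instance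

-- ===== CLAIM (what is proved, stated in full; the proofs are below) =====
def Claim_equal_part1 : Prop := ∀ (data : List Int) (n : Int), Dom_part1 data n → Spec_part1 data n (part1 data n)

-- ===== LEMMAS AND PROOFS =====

-- xor commutes with taking the low k bits
theorem xor_mod_two_pow (a b k : ℕ) : (a ^^^ b) % 2^k = a % 2^k ^^^ b % 2^k := by
  apply Nat.eq_of_testBit_eq; intro i
  simp [Nat.testBit_mod_two_pow, Nat.testBit_xor]
  by_cases h : i < k <;> simp [h]

theorem xor_parity (a b : ℕ) : (a ^^^ b) % 2 = (a % 2 + b % 2) % 2 := by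
  have h := xor_mod_two_pow a b 1
  norm_num at h
  rcases Nat.mod_two_eq_zero_or_one a with h1 | h1 <;>
    rcases Nat.mod_two_eq_zero_or_one b with h2 | h2 <;>
      simp [h, h1, h2]

-- xor with the all-ones mask is complement inside k bits
theorem xor_two_pow_sub_one (k : ℕ) : ∀ x : ℕ, x < 2^k → x ^^^ (2^k - 1) = 2^k - 1 - x := by
  induction k with
  | zero => intro x hx; interval_cases x; simp
  | succ k ih =>
    intro x hx
    have h2 : 2^(k+1) = 2 * 2^k := by ring
    have hdiv : (x ^^^ (2^(k+1) - 1)) / 2 = x / 2 ^^^ (2^k - 1) := by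
      rw [Nat.xor_div_two]; congr 1; omega
    have hpar : (x ^^^ (2^(k+1) - 1)) % 2 = (x % 2 + 1) % 2 := by
      rw [xor_parity]; congr 2; omega
    have hx2 : x / 2 < 2^k := by omega
    have hih := ih (x / 2) hx2
    have he : x ^^^ (2^(k+1) - 1) = 2 * ((x ^^^ (2^(k+1) - 1)) / 2) + (x ^^^ (2^(k+1) - 1)) % 2 := by
      omega
    rw [hdiv, hih] at he
    have hp : (0:ℕ) < 2^k := Nat.two_pow_pos k
    omega

-- adding a fresh high bit is xor
theorem add_two_pow_eq_xor (k : ℕ) : ∀ x : ℕ, x < 2^k → x + 2^k = x ^^^ 2^k := by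
  induction k with
  | zero => intro x hx; interval_cases x; simp
  | succ k ih =>
    intro x hx
    have h2 : 2^(k+1) = 2 * 2^k := by ring
    have hdiv : (x ^^^ 2^(k+1)) / 2 = x / 2 ^^^ 2^k := by
      rw [Nat.xor_div_two]; congr 1; omega
    have hpar : (x ^^^ 2^(k+1)) % 2 = (x % 2 + 2^(k+1) % 2) % 2 := xor_parity x _
    have hx2 : x / 2 < 2^k := by omega
    have hih := ih (x / 2) hx2
    have he : x ^^^ 2^(k+1) = 2 * ((x ^^^ 2^(k+1)) / 2) + (x ^^^ 2^(k+1)) % 2 := by omega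
    rw [hdiv, ← hih] at he
    have hp : (0:ℕ) < 2^k := Nat.two_pow_pos k
    omega

theorem mod_two_pow_succ (x k : ℕ) : x % 2^(k+1) = x % 2^k + 2^k * (x / 2^k % 2) := by
  rw [pow_succ]; exact Nat.mod_mul

-- Python `%` by 2^24 as a Nat, for nonnegative and negative arguments
theorem modm_nonneg (a : Int) (h : 0 ≤ a) :
    PySem.Int.mod a 16777216 = ((a.toNat % 16777216 : ℕ) : Int) := by
  rw [PySem.Int.mod_eq_emod_of_pos (by norm_num)]; omega

theorem modm_neg (a : Int) (h : a < 0) :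
    PySem.Int.mod a 16777216 = ((16777215 - ((-a-1).toNat % 16777216) : ℕ) : Int) := by
  rw [PySem.Int.mod_eq_emod_of_pos (by norm_num)]; omega

-- Python xor followed by `% 2**24` equals Nat xor of the two reduced operands
theorem and_mask (x : ℕ) : x &&& 16777215 = x % 16777216 := by
  have h := Nat.and_two_pow_sub_one_eq_mod x 24
  norm_num at h
  exact h

theorem xor_mod_M (u v : ℕ) : (u ^^^ v) % 16777216 = u % 16777216 ^^^ v % 16777216 := by
  have h := xor_mod_two_pow u v 24
  norm_num at h
  exact h

theorem cmp_M (z : ℕ) (hz : z < 16777216) : z ^^^ 16777215 = 16777215 - z := by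
  have h := xor_two_pow_sub_one 24 z (by norm_num; omega)
  norm_num at h
  exact h

theorem xor_lt_M (u v : ℕ) (hu : u < 16777216) (hv : v < 16777216) : u ^^^ v < 16777216 := by
  have h := xor_mod_M u v
  rw [Nat.mod_eq_of_lt hu, Nat.mod_eq_of_lt hv] at h
  have h2 : (u ^^^ v) % 16777216 < 16777216 := Nat.mod_lt _ (by norm_num)
  omega

theorem bxor_modm (a b : Int) :
    PySem.Int.mod (PySem.Int.bxor a b) 16777216 =
      (((PySem.Int.mod a 16777216).toNat ^^^ (PySem.Int.mod b 16777216).toNat : ℕ) : Int) := by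
  have hmlt : ∀ z : ℕ, z % 16777216 < 16777216 := fun z => Nat.mod_lt _ (by norm_num)
  by_cases ha : 0 ≤ a <;> by_cases hb : 0 ≤ b
  · rw [show PySem.Int.bxor a b = ((a.toNat ^^^ b.toNat : ℕ) : Int) from by
      simp [PySem.Int.bxor, ha, hb]]
    rw [modm_nonneg _ (by positivity), modm_nonneg a ha, modm_nonneg b hb]
    simp only [Int.toNat_natCast]
    rw [xor_mod_M]
  · have hb' : b < 0 := by omega
    rw [show PySem.Int.bxor a b = -((a.toNat ^^^ (-b-1).toNat : ℕ) : Int) - 1 from by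
      simp [PySem.Int.bxor, ha, hb]]
    rw [modm_neg _ (by omega), modm_nonneg a ha, modm_neg b hb']
    simp only [Int.toNat_natCast]
    congr 1
    have he : (-(-((a.toNat ^^^ (-b-1).toNat : ℕ) : Int) - 1) - 1).toNat
        = a.toNat ^^^ (-b-1).toNat := by omega
    rw [he, xor_mod_M, ← cmp_M _ (hmlt _), ← Nat.xor_assoc, ← cmp_M _ (xor_lt_M _ _ (hmlt _) (hmlt _))]
  · have ha' : a < 0 := by omega
    rw [show PySem.Int.bxor a b = -(((-a-1).toNat ^^^ b.toNat : ℕ) : Int) - 1 from by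
      simp [PySem.Int.bxor, ha, hb]]
    rw [modm_neg _ (by omega), modm_neg a ha', modm_nonneg b hb]
    simp only [Int.toNat_natCast]
    congr 1
    have he : (-(-((((-a-1).toNat ^^^ b.toNat : ℕ)) : Int) - 1) - 1).toNat
        = (-a-1).toNat ^^^ b.toNat := by omega
    rw [he, xor_mod_M, ← cmp_M _ (hmlt _), ← cmp_M _ (xor_lt_M _ _ (hmlt _) (hmlt _))]
    simp [Nat.xor_left_comm, Nat.xor_comm]
  · have ha' : a < 0 := by omega
    have hb' : b < 0 := by omega
    rw [show PySem.Int.bxor a b = (((-a-1).toNat ^^^ (-b-1).toNat : ℕ) : Int) from by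
      simp [PySem.Int.bxor, ha, hb]]
    rw [modm_nonneg _ (by positivity), modm_neg a ha', modm_neg b hb']
    simp only [Int.toNat_natCast]
    congr 1
    rw [xor_mod_M, ← cmp_M _ (hmlt _), ← cmp_M _ (hmlt _)]
    calc ((-a-1).toNat % 16777216) ^^^ ((-b-1).toNat % 16777216)
        = ((-a-1).toNat % 16777216 ^^^ 16777215) ^^^ ((-b-1).toNat % 16777216 ^^^ 16777215) := by
          simp [Nat.xor_left_comm, Nat.xor_comm]
      _ = _ := rfl

theorem shiftRight_xor_distrib' (a b i : ℕ) : (a ^^^ b) >>> i = a >>> i ^^^ b >>> i := by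
  apply Nat.eq_of_testBit_eq
  intro j
  simp [Nat.testBit_shiftRight, Nat.testBit_xor]

theorem lineL (k c x y : ℕ) :
    ((x ^^^ y) ^^^ (x ^^^ y) <<< k) &&& c
      = ((x ^^^ x <<< k) &&& c) ^^^ ((y ^^^ y <<< k) &&& c) := by
  rw [Nat.shiftLeft_xor_distrib, ← Nat.and_xor_distrib_right]
  congr 1
  simp [Nat.xor_left_comm, Nat.xor_comm]

theorem lineR (k c x y : ℕ) :
    ((x ^^^ y) ^^^ (x ^^^ y) >>> k) &&& c
      = ((x ^^^ x >>> k) &&& c) ^^^ ((y ^^^ y >>> k) &&& c) := by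
  rw [shiftRight_xor_distrib', ← Nat.and_xor_distrib_right]
  congr 1
  simp [Nat.xor_left_comm, Nat.xor_comm]

theorem altStep_linear (x y : ℕ) : altStep (x ^^^ y) = altStep x ^^^ altStep y := by
  simp only [altStep]
  rw [lineL 6 16777215 x y,
    lineR 5 16777215 ((x ^^^ x <<< 6) &&& 16777215) ((y ^^^ y <<< 6) &&& 16777215),
    lineL 11 16777215
      (((x ^^^ x <<< 6) &&& 16777215 ^^^ ((x ^^^ x <<< 6) &&& 16777215) >>> 5) &&& 16777215)
      (((y ^^^ y <<< 6) &&& 16777215 ^^^ ((y ^^^ y <<< 6) &&& 16777215) >>> 5) &&& 16777215)]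

theorem altStep_lt (z : ℕ) : altStep z < 16777216 := by
  have : altStep z ≤ 16777215 := Nat.and_le_right
  omega

theorem stepA1 (s : Int) (t : ℕ) (ht : PySem.Int.mod s 16777216 = (t : Int))
    (htl : t < 16777216) :
    PySem.Int.mod (PySem.Int.bxor (s * 64) s) 16777216
      = (((t ^^^ t <<< 6) &&& 16777215 : ℕ) : Int) := by
  rw [bxor_modm, ht]
  have h64 : PySem.Int.mod (s * 64) 16777216 = ((t * 64 % 16777216 : ℕ) : Int) := by
    have hsm : s % 16777216 = (t : Int) := by
      rw [← PySem.Int.mod_eq_emod_of_pos (show (0:ℤ) < 16777216 by norm_num)]; exact ht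
    rw [PySem.Int.mod_eq_emod_of_pos (by norm_num)]
    omega
  rw [h64]
  simp only [Int.toNat_natCast]
  congr 1
  rw [Nat.shiftLeft_eq, show (2:ℕ)^6 = 64 from rfl, and_mask, xor_mod_M,
    Nat.mod_eq_of_lt htl, Nat.xor_comm]

theorem stepA2 (w : ℕ) :
    PySem.Int.mod (PySem.Int.bxor (PySem.Int.floordiv (w : Int) 32) (w : Int)) 16777216
      = (((w ^^^ w >>> 5) &&& 16777215 : ℕ) : Int) := by
  rw [show ((32:ℤ)) = ((32:ℕ) : Int) from by norm_num, PySem.Int.floordiv_natCast,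
    PySem.Int.bxor_natCast, show ((16777216:ℤ)) = ((16777216:ℕ) : Int) from by norm_num,
    PySem.Int.mod_natCast]
  congr 1
  rw [and_mask, Nat.shiftRight_eq_div_pow, show (2:ℕ)^5 = 32 from rfl, Nat.xor_comm]

theorem stepA3 (w : ℕ) :
    PySem.Int.mod (PySem.Int.bxor ((w : Int) * 2048) (w : Int)) 16777216
      = (((w ^^^ w <<< 11) &&& 16777215 : ℕ) : Int) := by
  rw [show ((w : Int) * 2048) = ((w * 2048 : ℕ) : Int) from by push_cast; ring,
    PySem.Int.bxor_natCast, show ((16777216:ℤ)) = ((16777216:ℕ) : Int) from by norm_num,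
    PySem.Int.mod_natCast]
  congr 1
  rw [and_mask, Nat.shiftLeft_eq, show (2:ℕ)^11 = 2048 from rfl, Nat.xor_comm]

-- A's loop body equals B's `step` on the 24-bit residue
theorem body_eq (s : Int) :
    part1Body s = ((altStep (PySem.Int.mod s 16777216).toNat : ℕ) : Int) := by
  have htnn : 0 ≤ PySem.Int.mod s 16777216 := PySem.Int.mod_nonneg s (by norm_num)
  obtain ⟨t, ht⟩ : ∃ t : ℕ, PySem.Int.mod s 16777216 = (t : Int) :=
    ⟨_, (Int.toNat_of_nonneg htnn).symm⟩
  have htl : t < 16777216 := by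
    have := PySem.Int.mod_lt s (show (0:ℤ) < 16777216 by norm_num)
    omega
  rw [ht, Int.toNat_natCast]
  simp only [part1Body, altStep]
  rw [stepA1 s t ht htl, stepA2, stepA3]

-- prefix of Source B's `apply` loop
def lapp (cols : List ℕ) (x k : ℕ) : ℕ :=
  (List.range k).foldl (fun r j => if (x >>> j) &&& 1 = 1 then r ^^^ cols.getD j 0 else r) 0

theorem lapp_eq_altApply (cols : List ℕ) (x : ℕ) : altApply cols x = lapp cols x 24 := rfl

theorem cond_iff (x j : ℕ) : ((x >>> j) &&& 1 = 1) ↔ x.testBit j = true := by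
  simp [Nat.testBit, Nat.and_one_is_mod]

theorem lapp_succ (cols : List ℕ) (x k : ℕ) :
    lapp cols x (k+1) = if x.testBit k then lapp cols x k ^^^ cols.getD k 0 else lapp cols x k := by
  have hb : ((x >>> k) % 2 = 1) ↔ x.testBit k = true := by
    rw [← Nat.and_one_is_mod]; exact cond_iff x k
  by_cases h : x.testBit k = true
  · simp [lapp, List.range_succ, hb.mpr h, h]
  · have h2 : ¬ ((x >>> k) % 2 = 1) := fun hc => h (hb.mp hc)
    simp [lapp, List.range_succ, h2, h]

-- Source B's `apply` computes any GF(2)-linear map whose columns it is given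
theorem lapp_linear_spec (f : ℕ → ℕ) (hf : ∀ a b, f (a ^^^ b) = f a ^^^ f b) (hf0 : f 0 = 0)
    (cols : List ℕ) (hc : ∀ j, j < 24 → cols.getD j 0 = f (2^j)) :
    ∀ k, k ≤ 24 → ∀ x, lapp cols x k = f (x % 2^k) := by
  intro k
  induction k with
  | zero => intro _ x; simp [lapp, Nat.mod_one, hf0]
  | succ k ih =>
    intro hk x
    have hk' : k ≤ 24 := by omega
    have hbit : ((x >>> k) % 2 = 1) ↔ x.testBit k = true := by
      rw [← Nat.and_one_is_mod]; exact cond_iff x k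
    have hsr : x >>> k = x / 2^k := Nat.shiftRight_eq_div_pow x k
    have hmlt : x % 2^k < 2^k := Nat.mod_lt _ (Nat.two_pow_pos k)
    rw [lapp_succ, mod_two_pow_succ, ih hk']
    by_cases h : x.testBit k
    · have h1 : x / 2^k % 2 = 1 := by rw [← hsr]; exact hbit.mpr h
      rw [h1, hc k (by omega), ← hf, ← add_two_pow_eq_xor k _ hmlt]
      simp [h]
    · have h1 : x / 2^k % 2 = 0 := by
        rcases Nat.mod_two_eq_zero_or_one (x / 2^k) with h0 | h0
        · exact h0
        · exact absurd (hbit.mp (by rw [hsr]; exact h0)) h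
      simp [h, h1]

theorem apply_spec (f : ℕ → ℕ) (hf : ∀ a b, f (a ^^^ b) = f a ^^^ f b) (hf0 : f 0 = 0)
    (cols : List ℕ) (hc : ∀ j, j < 24 → cols.getD j 0 = f (2^j)) (x : ℕ) :
    altApply cols x = f (x % 16777216) := by
  rw [lapp_eq_altApply, lapp_linear_spec f hf hf0 cols hc 24 le_rfl x]
  norm_num

theorem lapp_congr (cols : List ℕ) (x y : ℕ) :
    ∀ k, (∀ j, j < k → x.testBit j = y.testBit j) → lapp cols x k = lapp cols y k := by
  intro k
  induction k with
  | zero => intro _; rfl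
  | succ k ih =>
    intro h
    rw [lapp_succ, lapp_succ, h k (Nat.lt_succ_self k),
      ih (fun j hj => h j (Nat.lt_succ_of_lt hj))]

theorem lapp_xor (cols : List ℕ) (x y : ℕ) :
    ∀ k, lapp cols (x ^^^ y) k = lapp cols x k ^^^ lapp cols y k := by
  intro k
  induction k with
  | zero => simp [lapp]
  | succ k ih =>
    rw [lapp_succ, lapp_succ, lapp_succ, Nat.testBit_xor]
    cases x.testBit k <;> cases y.testBit k <;>
      simp [ih, Nat.xor_assoc, Nat.xor_left_comm, Nat.xor_comm, Nat.xor_self,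
        Nat.xor_zero]

theorem lapp_zero (cols : List ℕ) : ∀ k, lapp cols 0 k = 0 := by
  intro k
  induction k with
  | zero => rfl
  | succ k ih => rw [lapp_succ]; simp [Nat.zero_testBit, ih]

theorem apply_mod (cols : List ℕ) (x : ℕ) :
    altApply cols (x % 16777216) = altApply cols x := by
  rw [lapp_eq_altApply, lapp_eq_altApply]
  apply lapp_congr
  intro j hj
  have : (16777216 : ℕ) = 2^24 := by norm_num
  rw [this, Nat.testBit_mod_two_pow]
  simp [show j < 24 from hj]

theorem apply_basis (cols : List ℕ) (j : ℕ) (hj : j < 24) :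
    altApply cols (2^j) = cols.getD j 0 := by
  have aux : ∀ k, lapp cols (2^j) k = if j < k then cols.getD j 0 else 0 := by
    intro k
    induction k with
    | zero => simp [lapp]
    | succ k ih =>
      rw [lapp_succ, Nat.testBit_two_pow, ih]
      by_cases hjk : j = k
      · subst hjk; simp
      · by_cases hlt : j < k
        · simp [hjk, hlt, Nat.lt_succ_of_lt hlt]
        · have : ¬ j < k + 1 := by omega
          simp [hjk, hlt, this]
  rw [lapp_eq_altApply, aux 24]
  simp [hj]

theorem compose_spec (A B : List ℕ) (hB : B.length = 24) (x : ℕ) :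
    altApply (altCompose A B) x = altApply A (altApply B x) := by
  have hf : ∀ a b, altApply A (altApply B (a ^^^ b)) =
      altApply A (altApply B a) ^^^ altApply A (altApply B b) := by
    intro a b
    rw [lapp_eq_altApply B, lapp_eq_altApply B, lapp_eq_altApply B, lapp_xor]
    rw [lapp_eq_altApply A, lapp_eq_altApply A, lapp_eq_altApply A, lapp_xor]
  have hf0 : altApply A (altApply B 0) = 0 := by
    rw [lapp_eq_altApply B, lapp_zero, lapp_eq_altApply A, lapp_zero]
  have hc : ∀ j, j < 24 → (altCompose A B).getD j 0 = altApply A (altApply B (2^j)) := by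
    intro j hj
    rw [apply_basis B j hj, altCompose, List.getD_eq_getElem?_getD, List.getElem?_map,
      List.getD_eq_getElem?_getD]
    have : B[j]? = some (B.getD j 0) := by
      simp [List.getD_eq_getElem?_getD, List.getElem?_eq_getElem (show j < B.length by omega)]
    rw [this]
    rfl
  rw [apply_spec (fun z => altApply A (altApply B z)) hf hf0 (altCompose A B) hc x]
  rw [apply_mod B x]

-- invariant tying a column list to a power of the step function
def GoodM (cols : List ℕ) (q : ℕ) : Prop :=
  cols.length = 24 ∧ ∀ x, altApply cols x = altStep^[q] (x % 16777216)

theorem iter_lt (q y : ℕ) (h : y < 16777216) : altStep^[q] y < 16777216 := by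
  induction q with
  | zero => simpa
  | succ q ih => rw [Function.iterate_succ_apply']; exact altStep_lt _

theorem getD_map_range_24 (f : ℕ → ℕ) (j : ℕ) (hj : j < 24) :
    ((List.range 24).map f).getD j 0 = f j := by
  rw [List.getD_eq_getElem?_getD, List.getElem?_map, List.getElem?_range hj]
  rfl

theorem good_base : GoodM ((List.range 24).map (fun j => altStep (1 <<< j))) 1 := by
  constructor
  · simp
  · intro x
    have hf : ∀ a b, altStep (a ^^^ b) = altStep a ^^^ altStep b := altStep_linear
    have hc : ∀ j, j < 24 → ((List.range 24).map (fun j => altStep (1 <<< j))).getD j 0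
        = altStep (2^j) := by
      intro j hj
      rw [getD_map_range_24 _ j hj, Nat.shiftLeft_eq, one_mul]
    rw [apply_spec altStep hf (by rfl) _ hc x]
    rfl

theorem good_id : GoodM ((List.range 24).map (fun j => 1 <<< j)) 0 := by
  constructor
  · simp
  · intro x
    have hc : ∀ j, j < 24 → ((List.range 24).map (fun j => 1 <<< j)).getD j 0 = 2^j := by
      intro j hj
      rw [getD_map_range_24 _ j hj, Nat.shiftLeft_eq, one_mul]
    rw [apply_spec (fun z => z) (fun _ _ => rfl) rfl _ hc x]
    rfl

theorem good_compose (A B : List ℕ) (p q : ℕ) (hA : GoodM A p) (hB : GoodM B q) :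
    GoodM (altCompose A B) (p + q) := by
  obtain ⟨hAl, hAs⟩ := hA
  obtain ⟨hBl, hBs⟩ := hB
  constructor
  · simp [altCompose, hBl]
  · intro x
    have hlt : altStep^[q] (x % 16777216) < 16777216 :=
      iter_lt q _ (Nat.mod_lt _ (by norm_num))
    rw [compose_spec A B hBl x, hBs x, hAs _, Nat.mod_eq_of_lt hlt,
      ← Function.iterate_add_apply]

theorem good_pow : ∀ m base res p q, GoodM base p → GoodM res q →
    GoodM (altPow base res m) (q + p * m) := by
  intro m
  induction m using Nat.strong_induction_on with
  | _ m ih =>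
    intro base res p q hbase hres
    rw [altPow]
    by_cases hm : m = 0
    · simpa [hm] using hres
    · have hdiv : m / 2 < m := Nat.div_lt_self (Nat.pos_of_ne_zero hm) one_lt_two
      have hbase' : GoodM (altCompose base base) (p + p) := good_compose _ _ _ _ hbase hbase
      by_cases hpar : m % 2 = 1
      · have h := ih (m / 2) hdiv _ _ _ _ hbase' (good_compose _ _ _ _ hbase hres)
        have he : p + q + (p + p) * (m / 2) = q + p * m := by
          have hm2 : m = 2 * (m / 2) + 1 := by omega
          conv_rhs => rw [hm2]
          ring
        simpa [hm, hpar, he] using h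
      · have h := ih (m / 2) hdiv _ _ _ _ hbase' hres
        have he : q + (p + p) * (m / 2) = q + p * m := by
          have hm2 : m = 2 * (m / 2) := by omega
          conv_rhs => rw [hm2]
          ring
        simpa [hm, hpar, he] using h

theorem foldl_const_iterate (l : List Int) (s : Int) :
    l.foldl (fun s _ => part1Body s) s = part1Body^[l.length] s := by
  induction l generalizing s with
  | nil => simp
  | cons a l ih => rw [List.foldl_cons, ih, List.length_cons, Function.iterate_succ_apply]

theorem iterate_body (q : ℕ) : ∀ s : Int,
    part1Body^[q+1] s = ((altStep^[q+1] (PySem.Int.mod s 16777216).toNat : ℕ) : Int) := by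
  induction q with
  | zero => intro s; simpa using body_eq s
  | succ q ih =>
    intro s
    rw [Function.iterate_succ_apply part1Body (q+1) s, ih (part1Body s), body_eq s]
    have h1 : PySem.Int.mod ((altStep (PySem.Int.mod s 16777216).toNat : ℕ) : Int) 16777216
        = ((altStep (PySem.Int.mod s 16777216).toNat : ℕ) : Int) := by
      rw [show ((16777216:ℤ)) = ((16777216:ℕ) : Int) from by norm_num, PySem.Int.mod_natCast,
        Nat.mod_eq_of_lt (altStep_lt _)]
    rw [h1, Int.toNat_natCast, ← Function.iterate_succ_apply altStep (q+1)]

theorem pyRange_nonpos (n : Int) (h : n ≤ 0) : PySem.List.pyRange 0 n 1 = [] := by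
  simp [PySem.List.pyRange, show ¬ ((0:ℤ) < n) from by omega]

-- ===== VERDICT (by name: the statement is the Claim_ definition above) =====
theorem part1_spec : Claim_equal_part1 := by
  unfold Claim_equal_part1 Spec_part1
  intro data n _
  by_cases hn : n ≤ 0
  · simp only [part1, part1_alt, pyRange_nonpos n hn, List.foldl_nil]
    rw [if_pos hn]
  · have hgood := good_pow n.toNat _ _ 1 0 good_base good_id
    rw [show 0 + 1 * n.toNat = n.toNat from by omega] at hgood
    obtain ⟨hlen, happ⟩ := hgood
    have hrange : PySem.List.pyRange 0 n 1
        = List.map (fun k : ℕ => (k : ℤ)) (List.range n.toNat) := by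
      rw [show n = ((n.toNat : ℕ) : ℤ) from by omega]
      exact PySem.List.pyRange_zero_natCast n.toNat
    simp only [part1, part1_alt, hrange]
    rw [if_neg hn]
    apply PySem.List.foldl_congr_mem
    intro acc x _
    congr 1
    rw [foldl_const_iterate, List.length_map, List.length_range, happ]
    have htn : (PySem.Int.mod x 16777216).toNat < 16777216 := by
      have h1 := PySem.Int.mod_lt x (show (0:ℤ) < 16777216 by norm_num)
      have h2 := PySem.Int.mod_nonneg x (show (0:ℤ) < 16777216 by norm_num)
      omega
    rw [Nat.mod_eq_of_lt htn]
    obtain ⟨q, hq2⟩ : ∃ q, n.toNat = q + 1 := ⟨n.toNat - 1, by omega⟩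
    rw [hq2, iterate_body q x]
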